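-- pv_equiv track=rewrite | github.com/DavidCJKennedy/Natural-Language-Processing | Named Entity Recognition/lab3.py | currentWordCurrentLabel
-- ===== SOURCE A (Python) =====
-- from operator import itemgetter
--
-- def currentWordCurrentLabel(corpus, threshold):
--     cw_cl_counts = {}
--
--     for line in corpus:
--         for pair in line:
--             term = pair[0] + '_' + pair[1]
--             if term in cw_cl_counts:
--                 cw_cl_counts[term] += 1
--             else:
--                 cw_cl_counts[term] = 1
--
--     sortedDictionary = { key: value for key, value in sorted(cw_cl_counts.items(), key = itemgetter(1), reverse = True) if value >= threshold}
--     return sortedDictionary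
-- ===== SOURCE B (Python) =====
-- def currentWordCurrentLabel(corpus, threshold):
--     counts = {}
--     for line in corpus:
--         for pair in line:
--             term = pair[0] + '_' + pair[1]
--             counts[term] = counts.get(term, 0) + 1
--
--     m = 0
--     for c in counts.values():
--         if c > m:
--             m = c
--
--     # bucket (counting) sort: scatter terms by count, then read counts high to low
--     buckets = [[] for _ in range(m + 1)]
--     for term, c in counts.items():
--         buckets[c].append(term)
--
--     lo = threshold if threshold > 1 else 1
--     result = {}
--     for c in range(m, lo - 1, -1):
--         for term in buckets[c]:
--             result[term] = c
--     return result
-- ===== Notes on version B (the rewrite author's own statement) =====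
-- stated objective: alternative
-- what changed: replaces the comparison sort of the (term,count) items by a counting/bucket sort: terms are scattered into buckets indexed by their count and emitted from the highest count down to the threshold, preserving tie (insertion) order
import Mathlib
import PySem

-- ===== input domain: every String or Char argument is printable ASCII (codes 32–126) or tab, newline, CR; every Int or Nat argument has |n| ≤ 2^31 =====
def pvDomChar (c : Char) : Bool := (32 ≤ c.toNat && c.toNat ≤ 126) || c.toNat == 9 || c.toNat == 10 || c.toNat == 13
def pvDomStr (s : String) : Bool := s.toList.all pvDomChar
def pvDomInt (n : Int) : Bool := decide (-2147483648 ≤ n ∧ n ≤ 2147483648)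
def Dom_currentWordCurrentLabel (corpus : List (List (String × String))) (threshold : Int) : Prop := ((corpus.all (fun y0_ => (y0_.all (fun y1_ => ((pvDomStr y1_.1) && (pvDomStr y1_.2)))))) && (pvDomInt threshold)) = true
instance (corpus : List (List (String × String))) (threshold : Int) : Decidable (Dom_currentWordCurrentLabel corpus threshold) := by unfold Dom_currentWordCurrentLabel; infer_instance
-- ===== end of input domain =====

-- B replaces A's comparison sort of the (term, count) items by a counting/bucket sort
-- (scatter terms into buckets indexed by their count, emit counts high-to-low down to
-- the threshold), preserving tie (insertion) order: an alternative algorithm, same cost class.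

-- ===== PORT A =====
def currentWordCurrentLabel (corpus : List (List (String × String))) (threshold : Int) : List (String × Int) :=
  let cw_cl_counts : PySem.Dict String Int :=
    corpus.foldl (fun d line =>
      line.foldl (fun d pair =>
        let term := pair.1 ++ "_" ++ pair.2
        if d.contains term then d.modify term 0 (fun v => v + 1) else d.insert term 1) d)
      PySem.Dict.empty
  let sortedDictionary : PySem.Dict String Int :=
    (PySem.List.sorted cw_cl_counts.items (fun p => p.2) true).foldl
      (fun d p => if p.2 ≥ threshold then d.insert p.1 p.2 else d) PySem.Dict.empty
  sortedDictionary.items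
-- ===== PORT B =====
def currentWordCurrentLabel_alt (corpus : List (List (String × String))) (threshold : Int) : List (String × Int) :=
  let counts : PySem.Dict String Int :=
    corpus.foldl (fun d line =>
      line.foldl (fun d pair =>
        let term := pair.1 ++ "_" ++ pair.2
        d.insert term (d.getD term 0 + 1)) d)
      PySem.Dict.empty
  let m : Int := counts.values.foldl (fun m c => if c > m then c else m) 0
  let buckets0 : List (List String) := (PySem.List.pyRange 0 (m + 1) 1).map (fun _ => [])
  let buckets := counts.items.foldl
    (fun bs p => PySem.List.pySetD bs p.2 (PySem.List.pyGetD bs p.2 [] ++ [p.1])) buckets0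
  let lo : Int := if threshold > 1 then threshold else 1
  let result : PySem.Dict String Int :=
    (PySem.List.pyRange m (lo - 1) (-1)).foldl
      (fun r c => (PySem.List.pyGetD buckets c []).foldl (fun r term => r.insert term c) r)
      PySem.Dict.empty
  result.items


-- ===== PRECONDITION & SPEC =====
def Spec_currentWordCurrentLabel (corpus : List (List (String × String))) (threshold : Int) (out : List (String × Int)) : Prop := out = currentWordCurrentLabel_alt corpus threshold
instance (corpus : List (List (String × String))) (threshold : Int) (out : List (String × Int)) : Decidable (Spec_currentWordCurrentLabel corpus threshold out) := by unfold Spec_currentWordCurrentLabel; infer_instance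

-- ===== CLAIM (what is proved, stated in full; the proofs are below) =====
def Claim_equal_currentWordCurrentLabel : Prop := ∀ (corpus : List (List (String × String))) (threshold : Int), Dom_currentWordCurrentLabel corpus threshold → Spec_currentWordCurrentLabel corpus threshold (currentWordCurrentLabel corpus threshold)

-- ===== LEMMAS AND PROOFS =====

theorem pvCountStep (d : PySem.Dict String Int) (t : String) :
    (if d.contains t then d.modify t 0 (fun v => v + 1) else d.insert t 1)
      = d.insert t (d.getD t 0 + 1) := by
  by_cases h : d.contains t
  · simp [PySem.Dict.modify, h]
  · rw [if_neg (by simp [h]), PySem.Dict.getD_of_not_contains d 0 (by simpa using h)]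
    norm_num

theorem pvInsertBy_append {α : Type} (before : α → α → Bool) (x : α) (A B : List α)
    (h : ∀ y ∈ A, before x y = false) :
    PySem.List.insertBy before x (A ++ B) = A ++ PySem.List.insertBy before x B := by
  induction A with
  | nil => simp
  | cons a A ih =>
      simp only [List.cons_append, PySem.List.insertBy, h a (by simp)]
      simp only [Bool.false_eq_true, if_false, List.cons.injEq, true_and]
      exact ih (fun y hy => h y (by simp [hy]))

theorem pvInsertBy_front {α : Type} (before : α → α → Bool) (x : α) (ys : List α)
    (h : ∀ y ∈ ys, before x y = true) :
    PySem.List.insertBy before x ys = x :: ys := by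
  cases ys with
  | nil => rfl
  | cons y ys => simp [PySem.List.insertBy, h y (by simp)]

theorem pvInsertBy_flatMap (n : Nat) (g : Int → List (String × Int)) (x : String × Int)
    (hg : ∀ c, ∀ p ∈ g c, p.2 = c) (hx1 : 1 ≤ x.2) (hxn : x.2 ≤ (n : Int)) :
    PySem.List.insertBy (fun a b => decide (b.2 < a.2)) x
        ((PySem.List.pyRange (n : Int) 0 (-1)).flatMap g)
      = (PySem.List.pyRange (n : Int) 0 (-1)).flatMap
          (fun c => if c = x.2 then g c ++ [x] else g c) := by
  induction n with
  | zero => omega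
  | succ n ih =>
      have hcons : PySem.List.pyRange ((n + 1 : Nat) : Int) 0 (-1)
          = ((n + 1 : Nat) : Int) :: PySem.List.pyRange ((n : Nat) : Int) 0 (-1) := by
        rw [PySem.List.pyRange_neg_one_cons (by push_cast; omega)]
        norm_num
      rw [hcons]
      simp only [List.flatMap_cons]
      by_cases hx : x.2 = ((n + 1 : Nat) : Int)
      · rw [pvInsertBy_append _ _ _ _ (fun y hy => by
              simp only [decide_eq_false_iff_not, not_lt]
              rw [hg _ y hy, hx])]
        rw [pvInsertBy_front _ _ _ (fun y hy => by
              simp only [List.mem_flatMap] at hy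
              obtain ⟨c, hc, hyc⟩ := hy
              rw [PySem.List.mem_pyRange_neg_one] at hc
              simp only [decide_eq_true_eq]
              rw [hg c y hyc, hx]; omega)]
        have hsame : List.flatMap (fun c => if c = x.2 then g c ++ [x] else g c)
            (PySem.List.pyRange ((n : Nat) : Int) 0 (-1))
            = List.flatMap g (PySem.List.pyRange ((n : Nat) : Int) 0 (-1)) :=
          List.flatMap_congr (fun c hc => by
            rw [PySem.List.mem_pyRange_neg_one] at hc
            rw [if_neg (by omega)])
        rw [if_pos hx.symm, hsame]
        simp
      · rw [pvInsertBy_append _ _ _ _ (fun y hy => by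
              simp only [decide_eq_false_iff_not, not_lt]
              rw [hg _ y hy]; omega)]
        rw [ih (by omega), if_neg (fun hEq => hx hEq.symm)]

theorem pvSorted_eq_flatMap (xs : List (String × Int)) (n : Nat)
    (h : ∀ p ∈ xs, 1 ≤ p.2 ∧ p.2 ≤ (n : Int)) :
    PySem.List.sorted xs (fun p => p.2) true
      = (PySem.List.pyRange (n : Int) 0 (-1)).flatMap
          (fun c => xs.filter (fun p => p.2 == c)) := by
  induction xs using List.reverseRecOn with
  | nil => simp [PySem.List.sorted]
  | append_singleton xs x ih =>
      rw [PySem.List.sorted_rev_eq_foldl_insertBy, List.foldl_append, List.foldl_cons,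
          List.foldl_nil, ← PySem.List.sorted_rev_eq_foldl_insertBy,
          ih (fun p hp => h p (by simp [hp]))]
      rw [pvInsertBy_flatMap n _ x
            (fun c p hp => by simpa using (List.mem_filter.mp hp).2)
            (h x (by simp)).1 (h x (by simp)).2]
      exact congrArg (fun f => List.flatMap f _) (funext fun c => by
        rw [List.filter_append]
        by_cases hc : c = x.2
        · rw [if_pos hc]
          simp [hc]
        · rw [if_neg hc]
          have : ((x.2 == c) = false) := by simpa using fun hEq => hc hEq.symm
          simp [this])

theorem pvRange_if_flatMap (n : Nat) (lo : Int) (g : Int → List (String × Int)) (hlo : 1 ≤ lo) :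
    (PySem.List.pyRange (n : Int) 0 (-1)).flatMap (fun c => if lo ≤ c then g c else [])
      = (PySem.List.pyRange (n : Int) (lo - 1) (-1)).flatMap g := by
  induction n with
  | zero =>
      simp only [Nat.cast_zero]
      rw [PySem.List.pyRange_neg_one_eq_nil (le_refl 0),
          PySem.List.pyRange_neg_one_eq_nil (by omega)]
      rfl
  | succ n ih =>
      have hcons : PySem.List.pyRange ((n + 1 : Nat) : Int) 0 (-1)
          = ((n + 1 : Nat) : Int) :: PySem.List.pyRange ((n : Nat) : Int) 0 (-1) := by
        rw [PySem.List.pyRange_neg_one_cons (by push_cast; omega)]; norm_num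
      by_cases hle : lo ≤ ((n + 1 : Nat) : Int)
      · have hcons2 : PySem.List.pyRange ((n + 1 : Nat) : Int) (lo - 1) (-1)
            = ((n + 1 : Nat) : Int) :: PySem.List.pyRange ((n : Nat) : Int) (lo - 1) (-1) := by
          rw [PySem.List.pyRange_neg_one_cons (by omega)]; norm_num
        rw [hcons, hcons2]
        simp only [List.flatMap_cons]
        rw [if_pos hle, ih]
      · have h1 : PySem.List.pyRange ((n + 1 : Nat) : Int) (lo - 1) (-1) = [] :=
          PySem.List.pyRange_neg_one_eq_nil (by omega)
        have h2 : PySem.List.pyRange ((n : Nat) : Int) (lo - 1) (-1) = [] :=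
          PySem.List.pyRange_neg_one_eq_nil (by omega)
        rw [hcons]
        simp only [List.flatMap_cons]
        rw [if_neg hle, ih, h1, h2]
        simp

theorem pvFoldInsert (L : List (String × Int)) (d : PySem.Dict String Int)
    (hfresh : ∀ p ∈ L, d.contains p.1 = false) (hnd : (L.map (·.1)).Nodup) :
    (L.foldl (fun d p => d.insert p.1 p.2) d).items = d.items ++ L := by
  induction L generalizing d with
  | nil => simp
  | cons p L ih =>
      have hp : d.contains p.1 = false := hfresh p (by simp)
      simp only [List.foldl_cons]
      rw [ih (d.insert p.1 p.2)
            (fun q hq => by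
              rw [PySem.Dict.contains_insert]
              have hne : q.1 ≠ p.1 := by
                simp only [List.map_cons, List.nodup_cons] at hnd
                exact fun hEq => hnd.1 (hEq ▸ List.mem_map_of_mem hq)
              simp [hne, hfresh q (by simp [hq])])
            (by simpa using hnd.of_cons),
          PySem.Dict.items_insert_of_not_contains d p.2 hp]
      simp

theorem pvScatter (ps : List (String × Int)) (bs : List (List String))
    (hb : ∀ p ∈ ps, 0 ≤ p.2 ∧ p.2.toNat < bs.length) (c : Int) (hc : 0 ≤ c) :
    PySem.List.pyGetD
        (ps.foldl (fun bs p => PySem.List.pySetD bs p.2 (PySem.List.pyGetD bs p.2 [] ++ [p.1])) bs)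
        c []
      = PySem.List.pyGetD bs c [] ++ (ps.filter (fun p => p.2 == c)).map (·.1) := by
  induction ps generalizing bs with
  | nil => simp
  | cons p ps ih =>
      have hp := hb p (by simp)
      set bs' := PySem.List.pySetD bs p.2 (PySem.List.pyGetD bs p.2 [] ++ [p.1]) with hbs'
      have hset : bs' = bs.set p.2.toNat (bs.getD p.2.toNat [] ++ [p.1]) := by
        rw [hbs', PySem.List.pySetD_of_nonneg bs _ hp.1, PySem.List.pyGetD_of_nonneg bs [] hp.1]
      have hlen : bs'.length = bs.length := by rw [hset]; simp
      have hget : ∀ (c' : Int), 0 ≤ c' →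
          PySem.List.pyGetD bs' c' [] =
            if c' = p.2 then PySem.List.pyGetD bs c' [] ++ [p.1] else PySem.List.pyGetD bs c' [] := by
        intro c' hc'
        rw [PySem.List.pyGetD_of_nonneg _ [] hc', PySem.List.pyGetD_of_nonneg _ [] hc', hset]
        by_cases hEq : c' = p.2
        · rw [if_pos hEq, hEq]
          rw [List.getD_eq_getElem?_getD, List.getD_eq_getElem?_getD,
              List.getElem?_set_self' ]
          simp [hp.2]
        · rw [if_neg hEq]
          rw [List.getD_eq_getElem?_getD, List.getD_eq_getElem?_getD,
              List.getElem?_set_ne (by omega), ← List.getD_eq_getElem?_getD]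
      rw [List.foldl_cons]
      rw [ih bs' (fun q hq => ⟨(hb q (by simp [hq])).1, by
            rw [hlen]; exact (hb q (by simp [hq])).2⟩)]
      rw [hget c hc]
      by_cases hEq : c = p.2
      · have : (p.2 == c) = true := by simp [hEq]
        rw [if_pos hEq, List.filter_cons, this]
        simp
      · have : (p.2 == c) = false := by simpa using fun h => hEq h.symm
        rw [if_neg hEq, List.filter_cons, this]
        simp

theorem pvEmit (cs : List Int) (h : Int → List String) (r : PySem.Dict String Int) :
    cs.foldl (fun r c => (h c).foldl (fun r term => r.insert term c) r) r
      = (cs.flatMap (fun c => (h c).map (fun t => (t, c)))).foldl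
          (fun r p => r.insert p.1 p.2) r := by
  induction cs generalizing r with
  | nil => simp
  | cons c cs ih => simp [List.foldl_append, List.foldl_map, ih]

theorem pvCountsInv (corpus : List (List (String × String))) :
    (let C := corpus.foldl (fun d line =>
        line.foldl (fun d pair =>
          d.insert (pair.1 ++ "_" ++ pair.2) (d.getD (pair.1 ++ "_" ++ pair.2) 0 + 1)) d)
        (PySem.Dict.empty : PySem.Dict String Int)
     C.keys.Nodup ∧ ∀ p ∈ C.items, 1 ≤ p.2) := by
  intro C
  have hC : C = (corpus.flatten).foldl (fun d pair =>
      d.insert (pair.1 ++ "_" ++ pair.2) (d.getD (pair.1 ++ "_" ++ pair.2) 0 + 1))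
      (PySem.Dict.empty : PySem.Dict String Int) := by
    rw [List.foldl_flatten]
  rw [hC]
  refine List.foldlRecOn (motive := fun (d : PySem.Dict String Int) => d.keys.Nodup ∧ ∀ p ∈ d.items, 1 ≤ p.2)
    corpus.flatten _ ?_ ?_
  · exact ⟨by simp [PySem.Dict.empty, PySem.Dict.keys], by simp [PySem.Dict.empty]⟩
  · intro d hd pair _
    refine ⟨PySem.Dict.nodup_keys_insert d _ _ hd.1, ?_⟩
    intro q hq
    rw [PySem.Dict.mem_items_insert] at hq
    rcases hq with hq | hq
    · have h0 : 0 ≤ d.getD (pair.1 ++ "_" ++ pair.2) 0 := by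
        rw [PySem.Dict.getD_eq_get?_getD]
        cases hopt : d.get? (pair.1 ++ "_" ++ pair.2) with
        | none => simp
        | some v =>
            simp only [Option.getD_some]
            simp only [PySem.Dict.get?, Option.map_eq_some_iff] at hopt
            obtain ⟨pr, hfind, hpr⟩ := hopt
            have := hd.2 pr (List.mem_of_find?_eq_some hfind)
            omega
      rw [hq]
      simpa using by omega
    · exact hd.2 q hq.1

theorem pvMain (corpus : List (List (String × String))) (threshold : Int) :
    currentWordCurrentLabel corpus threshold = currentWordCurrentLabel_alt corpus threshold := by
  simp only [currentWordCurrentLabel, currentWordCurrentLabel_alt]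
  have hfuneq : (fun (d : PySem.Dict String Int) (pair : String × String) =>
      if d.contains (pair.1 ++ "_" ++ pair.2) then d.modify (pair.1 ++ "_" ++ pair.2) 0 (fun v => v + 1)
      else d.insert (pair.1 ++ "_" ++ pair.2) 1)
    = (fun (d : PySem.Dict String Int) (pair : String × String) =>
        d.insert (pair.1 ++ "_" ++ pair.2) (d.getD (pair.1 ++ "_" ++ pair.2) 0 + 1)) :=
    funext fun d => funext fun pair => pvCountStep d _
  rw [hfuneq]
  obtain ⟨hnd, hge1⟩ := pvCountsInv corpus
  set C : PySem.Dict String Int := corpus.foldl (fun d line =>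
      line.foldl (fun d pair =>
        d.insert (pair.1 ++ "_" ++ pair.2) (d.getD (pair.1 ++ "_" ++ pair.2) 0 + 1)) d)
      PySem.Dict.empty with hCdef
  set m : Int := C.values.foldl (fun m c => if c > m then c else m) 0 with hmdef
  have hmax : (fun (m c : Int) => if c > m then c else m) = (fun (m c : Int) => max m c) :=
    funext fun a => funext fun b => by split <;> omega
  have hm0 : 0 ≤ m := by
    rw [hmdef, hmax]; exact (PySem.List.le_foldl_max_int C.values (fun v => v) 0).1
  have hub : ∀ p ∈ C.items, p.2 ≤ m := fun p hp => by
    rw [hmdef, hmax]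
    exact (PySem.List.le_foldl_max_int C.values (fun v => v) 0).2 p.2
      (by exact List.mem_map_of_mem hp)
  set mN := m.toNat with hmN
  have hmcast : (mN : Int) = m := Int.toNat_of_nonneg hm0
  have hbounds : ∀ p ∈ C.items, 1 ≤ p.2 ∧ p.2 ≤ (mN : Int) := fun p hp =>
    ⟨hge1 p hp, by rw [hmcast]; exact hub p hp⟩
  set lo : Int := if threshold > 1 then threshold else 1 with hlodef
  have hlo1 : 1 ≤ lo := by rw [hlodef]; split <;> omega
  -- A's comprehension loop = filter then plain inserts
  rw [PySem.List.foldl_ite_eq_foldl_filter (p := fun (p : String × Int) => p.2 ≥ threshold)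
        (f := fun (d : PySem.Dict String Int) p => d.insert p.1 p.2)]
  set LA := (PySem.List.sorted C.items (fun p => p.2) true).filter
      (fun p => decide (p.2 ≥ threshold)) with hLAdef
  -- LA in bucket form
  have hseg : LA = (PySem.List.pyRange m (lo - 1) (-1)).flatMap
      (fun c => C.items.filter (fun p => p.2 == c)) := by
    rw [hLAdef, pvSorted_eq_flatMap C.items mN hbounds, List.filter_flatMap]
    have h1 : ∀ c ∈ PySem.List.pyRange (mN : Int) 0 (-1),
        (C.items.filter (fun p => p.2 == c)).filter (fun p => decide (p.2 ≥ threshold))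
          = if lo ≤ c then C.items.filter (fun p => p.2 == c) else [] := by
      intro c hc
      rw [PySem.List.mem_pyRange_neg_one] at hc
      by_cases ht : threshold ≤ c
      · rw [if_pos (by rw [hlodef]; split <;> omega)]
        apply List.filter_eq_self.mpr
        intro p hp
        have h2 := (List.mem_filter.mp hp).2
        simp only [beq_iff_eq] at h2
        simp [ge_iff_le, h2, ht]
      · rw [if_neg (by rw [hlodef]; split <;> omega)]
        apply List.filter_eq_nil_iff.mpr
        intro p hp
        have h2 := (List.mem_filter.mp hp).2
        simp only [beq_iff_eq] at h2
        simp only [ge_iff_le, decide_eq_true_eq, h2]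
        omega
    rw [List.flatMap_congr h1, pvRange_if_flatMap mN lo _ hlo1, hmcast]
  -- LA's keys are distinct
  have hndLA : (LA.map (·.1)).Nodup := by
    have hsub : (LA.map (·.1)).Sublist
        ((PySem.List.sorted C.items (fun p => p.2) true).map (·.1)) :=
      List.Sublist.map _ (List.filter_sublist)
    have hperm : ((PySem.List.sorted C.items (fun p => p.2) true).map (·.1)).Perm
        (C.items.map (·.1)) := (PySem.List.sorted_perm _ _ _).map _
    have hndm : (C.items.map (·.1)).Nodup := by simpa [PySem.Dict.keys] using hnd
    exact hsub.nodup (hperm.nodup_iff.mpr hndm)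
  rw [pvFoldInsert LA PySem.Dict.empty
        (fun p _ => by simp [PySem.Dict.empty, PySem.Dict.contains]) hndLA]
  -- B side
  set buckets0 : List (List String) := (PySem.List.pyRange 0 (m + 1) 1).map (fun _ => [])
    with hB0
  have hlen0 : buckets0.length = mN + 1 := by
    rw [hB0, List.length_map, PySem.List.length_pyRange_one]; omega
  have hget0 : ∀ (c : Int), 0 ≤ c → PySem.List.pyGetD buckets0 c [] = [] := by
    intro c hc
    rw [hB0, PySem.List.pyGetD_of_nonneg _ _ hc, List.getD_eq_getElem?_getD, List.getElem?_map]
    cases (PySem.List.pyRange 0 (m + 1) 1)[c.toNat]? <;> simp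
  set buckets := C.items.foldl
    (fun bs p => PySem.List.pySetD bs p.2 (PySem.List.pyGetD bs p.2 [] ++ [p.1])) buckets0
    with hbk
  have hbuck : ∀ (c : Int), 1 ≤ c →
      PySem.List.pyGetD buckets c [] = (C.items.filter (fun p => p.2 == c)).map (·.1) := by
    intro c hc
    rw [hbk, pvScatter C.items buckets0
          (fun p hp => ⟨by have := (hbounds p hp).1; omega,
                        by rw [hlen0]; have := hbounds p hp; omega⟩)
          c (by omega),
        hget0 c (by omega)]
    simp
  rw [pvEmit]
  have hLB : (PySem.List.pyRange m (lo - 1) (-1)).flatMap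
      (fun c => (PySem.List.pyGetD buckets c []).map (fun t => (t, c))) = LA := by
    refine (List.flatMap_congr ?_).trans hseg.symm
    intro c hc
    rw [PySem.List.mem_pyRange_neg_one] at hc
    rw [hbuck c (by omega), List.map_map]
    refine (List.map_congr_left ?_).trans (List.map_id _)
    intro p hp
    have h2 := (List.mem_filter.mp hp).2
    simp only [beq_iff_eq] at h2
    simp [Function.comp, ← h2]
  rw [hLB, pvFoldInsert LA PySem.Dict.empty
        (fun p _ => by simp [PySem.Dict.empty, PySem.Dict.contains]) hndLA]

-- ===== VERDICT (by name: the statement is the Claim_ definition above) =====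
theorem currentWordCurrentLabel_spec : Claim_equal_currentWordCurrentLabel :=
  fun corpus threshold _ => pvMain corpus threshold
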